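-- pv_equiv track=rewrite | github.com/mirmozavr/EPAMHW | hw1/task02/task02.py | check_fib
-- ===== SOURCE A (Python) =====
-- def check_fib(data) -> bool:
--
--     # process short data sequences (2 or less)
--     if len(data) == 0:
--         return False
--     if data[0] != 0:
--         return False
--     if len(data) == 1:
--         return True
--     if data[1] != 1:
--         return False
--     if len(data) == 2:
--         return True
--     # process longer data sequences(3 or more)
--     for i in range(2, len(data)):
--         if data[i] != data[i - 1] + data[i - 2]:
--             return False
--     return True
-- ===== SOURCE B (Python) =====
-- def check_fib(data) -> bool:
--     # Generate the canonical Fibonacci sequence forward with two accumulators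
--     # and compare each element against the expected value.
--     if len(data) == 0:
--         return False
--     a, b = 0, 1
--     for e in data:
--         if e != a:
--             return False
--         a, b = b, a + b
--     return True
-- ===== Notes on version B (the rewrite author's own statement) =====
-- stated objective: simpler
-- what changed: B generates the canonical Fibonacci values forward with two accumulators and compares each element to the expected value, instead of A's branch ladder on the first two elements plus an indexed loop verifying the recurrence against the data's own previous two entries.
import Mathlib
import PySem

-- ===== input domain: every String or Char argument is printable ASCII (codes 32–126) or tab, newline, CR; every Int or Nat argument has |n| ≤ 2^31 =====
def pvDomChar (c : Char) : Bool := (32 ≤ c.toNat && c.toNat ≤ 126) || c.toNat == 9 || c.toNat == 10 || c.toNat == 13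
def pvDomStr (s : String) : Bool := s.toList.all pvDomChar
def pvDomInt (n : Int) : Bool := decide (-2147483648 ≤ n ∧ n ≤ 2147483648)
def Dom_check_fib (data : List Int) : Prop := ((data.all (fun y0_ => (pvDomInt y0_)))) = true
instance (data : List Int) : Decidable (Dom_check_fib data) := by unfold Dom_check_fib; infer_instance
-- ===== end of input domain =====

-- B checks each element against forward-generated canonical Fibonacci values (two accumulators)
-- instead of A's branch ladder plus an indexed recurrence check; objective: simpler.

-- ===== PORT A =====
def check_fib (data : List Int) : Bool :=
  if data.length = 0 then false
  else if PySem.List.pyGetD data 0 0 ≠ 0 then false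
  else if data.length = 1 then true
  else if PySem.List.pyGetD data 1 0 ≠ 1 then false
  else if data.length = 2 then true
  else
    -- Python's early-return for-loop over range(2, len(data)) is this .all
    (PySem.List.pyRange 2 (data.length : Int) 1).all (fun i =>
      PySem.List.pyGetD data i 0 == PySem.List.pyGetD data (i - 1) 0 + PySem.List.pyGetD data (i - 2) 0)

-- ===== PORT B =====
-- the for-loop of Source B with accumulators a, b; early return False = result false
def fibStep : List Int → Int → Int → Bool
  | [], _, _ => true
  | e :: rest, a, b => if e ≠ a then false else fibStep rest b (a + b)

def check_fib_alt (data : List Int) : Bool :=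
  if data.length = 0 then false
  else fibStep data 0 1

-- ===== PRECONDITION & SPEC =====
def Spec_check_fib (data : List Int) (out : Bool) : Prop := out = check_fib_alt data
instance (data : List Int) (out : Bool) : Decidable (Spec_check_fib data out) := by unfold Spec_check_fib; infer_instance

-- ===== CLAIM (what is proved, stated in full; the proofs are below) =====
def Claim_equal_check_fib : Prop := ∀ (data : List Int), Dom_check_fib data → Spec_check_fib data (check_fib data)

-- ===== LEMMAS AND PROOFS =====

-- the expected-value sequence that Source B's accumulators generate
def fibS : Int → Int → Nat → Int
  | a, _, 0 => a
  | a, b, n + 1 => fibS b (a + b) n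

theorem fibS_add (a b : Int) (n : Nat) :
    fibS a b (n + 2) = fibS a b n + fibS a b (n + 1) := by
  induction n generalizing a b with
  | zero => simp [fibS]
  | succ n ih => simpa [fibS] using ih b (a + b)

theorem fibStep_iff (l : List Int) (a b : Int) :
    fibStep l a b = true ↔ ∀ i, i < l.length → l.getD i 0 = fibS a b i := by
  induction l generalizing a b with
  | nil => simp [fibStep]
  | cons e rest ih =>
    by_cases he : e = a
    · subst he
      simp only [fibStep, ne_eq, List.length_cons]
      rw [if_neg (by simp)]
      rw [ih]
      constructor
      · intro H i h
        match i with
        | 0 => simp [fibS]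
        | j + 1 => simpa [fibS] using H j (by omega)
      · intro H j h
        simpa [fibS] using H (j + 1) (by omega)
    · constructor
      · intro H; exact absurd H (by simp [fibStep, he])
      · intro H
        have := H 0 (by simp)
        simp at this
        exact absurd this he

theorem pyGetD_toNat (l : List Int) (x : Int) (h0 : 0 ≤ x) (h1 : x < l.length) :
    PySem.List.pyGetD l x 0 = l.getD x.toNat 0 := by
  rw [PySem.List.pyGetD_eq_getElem l 0 h0 h1, List.getD_eq_getElem l 0 (by omega)]

theorem allRange_iff (l : List Int) :
    ((PySem.List.pyRange 2 (l.length : Int) 1).all (fun i =>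
      PySem.List.pyGetD l i 0 == PySem.List.pyGetD l (i - 1) 0 + PySem.List.pyGetD l (i - 2) 0)) = true
    ↔ ∀ i : Nat, 2 ≤ i → i < l.length → l.getD i 0 = l.getD (i - 1) 0 + l.getD (i - 2) 0 := by
  rw [List.all_eq_true]
  constructor
  · intro H i h2 h
    have := H (i : Int) (by rw [PySem.List.mem_pyRange_one]; constructor <;> [exact_mod_cast h2; exact_mod_cast h])
    rw [pyGetD_toNat l _ (by omega) (by exact_mod_cast h),
        pyGetD_toNat l _ (by omega) (by omega),
        pyGetD_toNat l _ (by omega) (by omega)] at this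
    have e1 : ((i : Int)).toNat = i := by omega
    have e2 : ((i : Int) - 1).toNat = i - 1 := by omega
    have e3 : ((i : Int) - 2).toNat = i - 2 := by omega
    rw [e1, e2, e3, beq_iff_eq] at this
    exact this
  · intro H x hx
    rw [PySem.List.mem_pyRange_one] at hx
    obtain ⟨hx2, hxl⟩ := hx
    rw [pyGetD_toNat l _ (by omega) hxl,
        pyGetD_toNat l _ (by omega) (by omega),
        pyGetD_toNat l _ (by omega) (by omega)]
    have e2 : (x - 1).toNat = x.toNat - 1 := by omega
    have e3 : (x - 2).toNat = x.toNat - 2 := by omega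
    rw [e2, e3, beq_iff_eq]
    exact H x.toNat (by omega) (by omega)

theorem char_iff (l : List Int) (h0 : l.getD 0 0 = 0) (h1 : l.getD 1 0 = 1) :
    (∀ i : Nat, 2 ≤ i → i < l.length → l.getD i 0 = l.getD (i - 1) 0 + l.getD (i - 2) 0)
    ↔ ∀ i, i < l.length → l.getD i 0 = fibS 0 1 i := by
  constructor
  · intro H i
    induction i using Nat.strong_induction_on with
    | _ i ih =>
      intro h
      match i with
      | 0 => simpa [fibS] using h0
      | 1 => simpa [fibS] using h1
      | j + 2 =>
        have hr := H (j + 2) (by omega) h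
        rw [show j + 2 - 1 = j + 1 by omega, show j + 2 - 2 = j by omega] at hr
        rw [hr, ih j (by omega) (by omega), ih (j + 1) (by omega) (by omega), fibS_add]
        exact add_comm _ _
  · intro H i h2 h
    obtain ⟨j, rfl⟩ : ∃ j, i = j + 2 := ⟨i - 2, by omega⟩
    rw [show j + 2 - 1 = j + 1 by omega, show j + 2 - 2 = j by omega,
        H (j + 2) h, H (j + 1) (by omega), H j (by omega), fibS_add]
    exact add_comm _ _

theorem main_eq (data : List Int) : check_fib data = check_fib_alt data := by
  match data with
  | [] => rfl
  | [p] =>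
    simp only [check_fib, check_fib_alt, fibStep, PySem.List.pyGetD_zero_cons, List.length_cons,
      List.length_nil]
    split_ifs <;> simp_all
  | [p, q] =>
    have hq : PySem.List.pyGetD [p, q] 1 0 = q := by
      rw [pyGetD_toNat _ _ (by omega) (by simp)]; rfl
    simp only [check_fib, check_fib_alt, fibStep, hq, PySem.List.pyGetD_zero_cons,
      List.length_cons, List.length_nil]
    split_ifs <;> simp_all
  | p :: q :: r :: rest =>
    have hq : PySem.List.pyGetD (p :: q :: r :: rest) 1 0 = q := by
      rw [pyGetD_toNat _ _ (by omega) (by simp; omega)]; rfl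
    by_cases hp : p = 0
    · by_cases hq1 : q = 1
      · subst hp; subst hq1
        simp only [check_fib, check_fib_alt, hq, PySem.List.pyGetD_zero_cons, List.length_cons]
        rw [if_neg (by omega), if_neg (by simp), if_neg (by omega), if_neg (by simp),
            if_neg (by omega), if_neg (by omega)]
        rw [show ((rest.length + 1 + 1 + 1 : Nat) : Int)
              = (((0 : Int) :: 1 :: r :: rest).length : Int) from rfl]
        rw [Bool.eq_iff_iff, allRange_iff, fibStep_iff, char_iff _ rfl rfl]
      · -- second element wrong: both return false
        subst hp
        have hA : check_fib (0 :: q :: r :: rest) = false := by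
          simp only [check_fib, hq, PySem.List.pyGetD_zero_cons, List.length_cons]
          rw [if_neg (by omega), if_neg (by simp), if_neg (by omega), if_pos (by simpa using hq1)]
        have hB : check_fib_alt (0 :: q :: r :: rest) = false := by
          simp only [check_fib_alt, fibStep, List.length_cons]
          rw [if_neg (by omega), if_neg (by simp), if_pos (by simpa using hq1)]
        rw [hA, hB]
    · -- first element wrong: both return false
      simp [check_fib, check_fib_alt, fibStep, hp]

-- ===== VERDICT (by name: the statement is the Claim_ definition above) =====
theorem check_fib_spec : Claim_equal_check_fib := by
  intro data _
  unfold Spec_check_fib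
  exact main_eq data
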